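-- pv_equiv track=rewrite | github.com/kihass/Nahuales | nahuales/Checar/permutations.py | bitChanges
-- ===== SOURCE A (Python) =====
-- def bitChanges(byte):
-- 	""" Obtiene un arreglo con las nuevas posiciones
-- 	- byte     byte que se va a procesar
-- 	"""
-- 	alternate = []
-- 	changes = [None for i in range(8)]
--
-- 	for bit in range(8):
-- 		if byte >> bit & 0b1 == 1:
-- 			alternate.append(bit)
--
-- 		else:
-- 			changes[bit] = bit
--
-- 	for bit in range(len(alternate)):
-- 		if bit + 1 == len(alternate):
-- 			changes[alternate[bit]] = alternate[0]
--
-- 		else: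
-- 			changes[alternate[bit]] = alternate[bit + 1]
--
-- 	return changes
-- ===== SOURCE B (Python) =====
-- def bitChanges(byte):
-- 	""" Obtiene un arreglo con las nuevas posiciones
-- 	- byte     byte que se va a procesar
-- 	"""
-- 	changes = [None] * 8
-- 	first = None
-- 	prev = None
--
-- 	for bit in range(8):
-- 		if byte >> bit & 1:
-- 			if first is None:
-- 				first = bit
-- 			else:
-- 				changes[prev] = bit
-- 			prev = bit
-- 		else:
-- 			changes[bit] = bit
--
-- 	if prev is not None:
-- 		changes[prev] = first
--
-- 	return changes
-- ===== Notes on version B (the rewrite author's own statement) =====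
-- stated objective: simpler
-- what changed: A collects the set bits into a list and then re-scans that list with a wrap-around index to link the cycle; B builds the permutation in a single pass over bits 0..7 with two pointers (first and prev), linking consecutive set bits on the fly and closing the cycle after the loop.
import Mathlib
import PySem

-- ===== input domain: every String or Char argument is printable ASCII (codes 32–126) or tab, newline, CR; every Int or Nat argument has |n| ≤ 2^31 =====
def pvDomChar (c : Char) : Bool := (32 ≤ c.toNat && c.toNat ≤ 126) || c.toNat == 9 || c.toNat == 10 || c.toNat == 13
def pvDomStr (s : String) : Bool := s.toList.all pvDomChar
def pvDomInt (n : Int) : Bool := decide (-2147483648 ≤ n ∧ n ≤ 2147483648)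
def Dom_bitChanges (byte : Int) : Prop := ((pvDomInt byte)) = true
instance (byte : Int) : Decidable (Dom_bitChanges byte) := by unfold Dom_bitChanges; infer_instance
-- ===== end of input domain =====

-- B builds the cycle of set bits in ONE pass with two pointers (first/prev) instead of
-- collecting the set bits into a list and re-scanning it with a wrap-around index (objective: simpler).

-- ===== PORT A =====
-- `byte >> bit & 0b1`: Int >>> (Nat shift, arithmetic/floor, Python-exact) and PySem.Int.band;
-- `bit.toNat` is exact since bit ∈ range(8) is nonnegative.  `changes[i] = v` with i = alternate[bit]
-- always in [0,8) is List.set at i.toNat (exact: no IndexError reachable).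
def bitChanges (byte : Int) : List (Option Int) :=
  let alternate : List Int := []
  let changes : List (Option Int) := (PySem.List.pyRange 0 8 1).map (fun _ => none)
  let st := (PySem.List.pyRange 0 8 1).foldl
    (fun (st : List Int × List (Option Int)) bit =>
      if PySem.Int.band (byte >>> bit.toNat) 1 == 1 then
        (st.1 ++ [bit], st.2)
      else
        (st.1, st.2.set bit.toNat (some bit)))
    (alternate, changes)
  let alternate := st.1
  let changes := st.2
  (PySem.List.pyRange 0 (alternate.length : Int) 1).foldl
    (fun (ch : List (Option Int)) bit =>
      if bit + 1 == (alternate.length : Int) then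
        ch.set (PySem.List.pyGetD alternate bit 0).toNat (some (PySem.List.pyGetD alternate 0 0))
      else
        ch.set (PySem.List.pyGetD alternate bit 0).toNat (some (PySem.List.pyGetD alternate (bit + 1) 0)))
    changes

-- ===== PORT B =====
-- state = (changes, first, prev); whenever first ≠ none also prev ≠ none, so `prev.getD 0`
-- (Python reads the int in `prev` there) is exact.
def bitChanges_alt (byte : Int) : List (Option Int) :=
  let changes : List (Option Int) := List.replicate 8 none
  let st := (PySem.List.pyRange 0 8 1).foldl
    (fun (st : List (Option Int) × Option Int × Option Int) bit =>
      let changes := st.1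
      let first := st.2.1
      let prev := st.2.2
      if PySem.Int.band (byte >>> bit.toNat) 1 != 0 then
        if first = none then
          (changes, some bit, some bit)
        else
          (changes.set (prev.getD 0).toNat (some bit), first, some bit)
      else
        (changes.set bit.toNat (some bit), first, prev))
    (changes, none, none)
  match st.2.2 with
  | some p => st.1.set p.toNat st.2.1
  | none => st.1

-- ===== PRECONDITION & SPEC =====
def Spec_bitChanges (byte : Int) (out : List (Option Int)) : Prop := out = bitChanges_alt byte
instance (byte : Int) (out : List (Option Int)) : Decidable (Spec_bitChanges byte out) := by unfold Spec_bitChanges; infer_instance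

-- ===== CLAIM (what is proved, stated in full; the proofs are below) =====
def Claim_equal_bitChanges : Prop := ∀ (byte : Int), Dom_bitChanges byte → Spec_bitChanges byte (bitChanges byte)

-- ===== LEMMAS AND PROOFS =====

-- the bit test only depends on byte mod 256 for bits 0..7
theorem pv_test_congr (byte : Int) (b : Nat) (hb : b < 8) :
    PySem.Int.band (byte >>> (b : Int)) 1 = PySem.Int.band ((byte % 256) >>> (b : Int)) 1 := by
  rw [Int.shiftRight_natCast_right, Int.shiftRight_natCast_right,
    PySem.Int.band_one, PySem.Int.band_one,
    PySem.Int.mod_eq_emod_of_pos (by norm_num), PySem.Int.mod_eq_emod_of_pos (by norm_num),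
    Int.shiftRight_eq_div_pow, Int.shiftRight_eq_div_pow]
  interval_cases b <;> (push_cast; omega)

theorem pv_A_emod (byte : Int) : bitChanges byte = bitChanges (byte % 256) := by
  have h : List.foldl
      (fun (st : List Int × List (Option Int)) bit =>
        if PySem.Int.band (byte >>> bit.toNat) 1 == 1 then (st.1 ++ [bit], st.2)
        else (st.1, st.2.set bit.toNat (some bit)))
      ([], (PySem.List.pyRange 0 8 1).map (fun _ => none)) (PySem.List.pyRange 0 8 1)
      = List.foldl
      (fun (st : List Int × List (Option Int)) bit =>
        if PySem.Int.band ((byte % 256) >>> bit.toNat) 1 == 1 then (st.1 ++ [bit], st.2)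
        else (st.1, st.2.set bit.toNat (some bit)))
      ([], (PySem.List.pyRange 0 8 1).map (fun _ => none)) (PySem.List.pyRange 0 8 1) := by
    apply PySem.List.foldl_congr_mem
    intro acc x hx
    rw [PySem.List.mem_pyRange_one] at hx
    rw [pv_test_congr byte x.toNat (by omega)]
  simp only [bitChanges]
  rw [h]

theorem pv_B_emod (byte : Int) : bitChanges_alt byte = bitChanges_alt (byte % 256) := by
  have h : List.foldl
      (fun (st : List (Option Int) × Option Int × Option Int) bit =>
        if PySem.Int.band (byte >>> bit.toNat) 1 != 0 then
          if st.2.1 = none then (st.1, some bit, some bit)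
          else (st.1.set (st.2.2.getD 0).toNat (some bit), st.2.1, some bit)
        else (st.1.set bit.toNat (some bit), st.2.1, st.2.2))
      (List.replicate 8 none, none, none) (PySem.List.pyRange 0 8 1)
      = List.foldl
      (fun (st : List (Option Int) × Option Int × Option Int) bit =>
        if PySem.Int.band ((byte % 256) >>> bit.toNat) 1 != 0 then
          if st.2.1 = none then (st.1, some bit, some bit)
          else (st.1.set (st.2.2.getD 0).toNat (some bit), st.2.1, some bit)
        else (st.1.set bit.toNat (some bit), st.2.1, st.2.2))
      (List.replicate 8 none, none, none) (PySem.List.pyRange 0 8 1) := by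
    apply PySem.List.foldl_congr_mem
    intro acc x hx
    rw [PySem.List.mem_pyRange_one] at hx
    rw [pv_test_congr byte x.toNat (by omega)]
  simp only [bitChanges_alt]
  rw [h]

set_option maxRecDepth 40000 in
set_option maxHeartbeats 2000000 in
theorem pv_fin : ∀ n : Fin 256, bitChanges (n : Int) = bitChanges_alt (n : Int) := by
  decide

-- ===== VERDICT (by name: the statement is the Claim_ definition above) =====
theorem bitChanges_spec : Claim_equal_bitChanges := by
  intro byte _
  unfold Spec_bitChanges
  rw [pv_A_emod, pv_B_emod]
  have h0 : 0 ≤ byte % 256 := Int.emod_nonneg byte (by norm_num)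
  have h1 : byte % 256 < 256 := Int.emod_lt_of_pos byte (by norm_num)
  have := pv_fin ⟨(byte % 256).toNat, by omega⟩
  simpa [Int.toNat_of_nonneg h0] using this
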